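-- pv_equiv track=rewrite | github.com/AdamZhouSE/pythonHomework | Code/CodeRecords/2793/60749/273117.py | count
-- ===== SOURCE A (Python) =====
-- def count(timearray,c):
--     count=1
--     for h in range(0,len(timearray)-1):
--         if timearray[h+1]-timearray[h] <=c:
--             count+=1
--         else:
--             count=1
--     return count
-- ===== SOURCE B (Python) =====
-- def count(timearray, c):
--     # Backward scan with early termination: the answer is 1 + the length of the
--     # trailing run of adjacent elements with gap <= c, so only that suffix is read.
--     cnt = 1
--     h = len(timearray) - 1
--     while h >= 1 and timearray[h] - timearray[h - 1] <= c:
--         cnt += 1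
--         h -= 1
--     return cnt
-- ===== Notes on version B (the rewrite author's own statement) =====
-- stated objective: alternative
-- what changed: B replaces A's full forward index-loop (which resets a counter on each large gap) by a backward scan of the reversed list that counts the trailing run of adjacent gaps <= c and stops at the first break, reading only the final run.
import Mathlib
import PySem

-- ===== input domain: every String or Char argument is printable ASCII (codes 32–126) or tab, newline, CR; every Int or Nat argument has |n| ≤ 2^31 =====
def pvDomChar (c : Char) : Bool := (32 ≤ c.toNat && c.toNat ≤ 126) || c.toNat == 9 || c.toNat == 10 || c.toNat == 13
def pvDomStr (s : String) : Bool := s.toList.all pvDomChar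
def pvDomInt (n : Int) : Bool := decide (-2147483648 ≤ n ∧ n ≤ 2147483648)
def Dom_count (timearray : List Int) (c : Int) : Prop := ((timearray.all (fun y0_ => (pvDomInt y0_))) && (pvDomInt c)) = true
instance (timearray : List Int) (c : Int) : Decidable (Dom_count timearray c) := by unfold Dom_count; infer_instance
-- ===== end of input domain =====

-- B scans backward from the end and stops at the first gap > c (only the trailing run is read);
-- A scans the whole array forward, resetting its counter. Same value everywhere; objective: alternative.

-- ===== PORT A =====
-- forward loop over range(0, len-1); indices h, h+1 are always in range, so pyGetD's default is never used
def count (timearray : List Int) (c : Int) : Int :=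
  (PySem.List.pyRange 0 ((timearray.length : Int) - 1) 1).foldl
    (fun cnt h =>
      if PySem.List.pyGetD timearray (h + 1) 0 - PySem.List.pyGetD timearray h 0 ≤ c
      then cnt + 1 else 1) 1

-- ===== PORT B =====
-- the while loop of Source B: h counts down; `h = 0` is the `h >= 1` exit, the else-branch is the break
def countAltGo (t : List Int) (c : Int) : Nat → Int → Int
  | 0, cnt => cnt
  | h + 1, cnt =>
      if PySem.List.pyGetD t ((h : Int) + 1) 0 - PySem.List.pyGetD t (h : Int) 0 ≤ c
      then countAltGo t c h (cnt + 1) else cnt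

def count_alt (timearray : List Int) (c : Int) : Int :=
  countAltGo timearray c (timearray.length - 1) 1

-- ===== PRECONDITION & SPEC =====
def Spec_count (timearray : List Int) (c : Int) (out : Int) : Prop := out = count_alt timearray c
instance (timearray : List Int) (c : Int) (out : Int) : Decidable (Spec_count timearray c out) := by unfold Spec_count; infer_instance

-- ===== CLAIM (what is proved, stated in full; the proofs are below) =====
def Claim_equal_count : Prop := ∀ (timearray : List Int) (c : Int), Dom_count timearray c → Spec_count timearray c (count timearray c)

-- ===== LEMMAS AND PROOFS =====

-- appending y leaves in-range reads unchanged
theorem pyGetD_append_left' (u : List Int) (y i : Int) (h0 : 0 ≤ i) (h1 : i < u.length) :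
    PySem.List.pyGetD (u ++ [y]) i 0 = PySem.List.pyGetD u i 0 := by
  rw [PySem.List.pyGetD_eq_getElem (u ++ [y]) 0 h0 (by simp; omega),
      PySem.List.pyGetD_eq_getElem u 0 h0 h1]
  exact List.getElem_append_left _

-- A's fold, one element peeled from the back
theorem count_append (u : List Int) (y : Int) (c : Int) (hu : u ≠ []) :
    count (u ++ [y]) c =
      if y - PySem.List.pyGetD u ((u.length : Int) - 1) 0 ≤ c then count u c + 1 else 1 := by
  obtain ⟨m', hm⟩ : ∃ m', u.length = m' + 1 :=
    ⟨u.length - 1, by have := List.length_pos_iff.mpr hu; omega⟩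
  unfold count
  have hb : ((u ++ [y]).length : Int) - 1 = (m' : Int) + 1 := by simp [hm]
  have hb' : ((u.length : Int)) - 1 = (m' : Int) := by rw [hm]; push_cast; ring
  rw [hb, hb', PySem.List.pyRange_one_succ_right (by positivity), List.foldl_append]
  have hcongr :
      (PySem.List.pyRange 0 (m' : Int) 1).foldl
        (fun cnt h =>
          if PySem.List.pyGetD (u ++ [y]) (h + 1) 0 - PySem.List.pyGetD (u ++ [y]) h 0 ≤ c
          then cnt + 1 else 1) (1 : Int) =
      (PySem.List.pyRange 0 (m' : Int) 1).foldl
        (fun cnt h =>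
          if PySem.List.pyGetD u (h + 1) 0 - PySem.List.pyGetD u h 0 ≤ c
          then cnt + 1 else 1) (1 : Int) := by
    apply PySem.List.foldl_congr_mem
    intro acc x hx
    rw [PySem.List.mem_pyRange_one] at hx
    rw [pyGetD_append_left' u y x hx.1 (by omega),
        pyGetD_append_left' u y (x + 1) (by omega) (by omega)]
  rw [hcongr]
  have hy : PySem.List.pyGetD (u ++ [y]) ((m' : Int) + 1) 0 = y := by
    have : ((m' : Int) + 1) = ((u.length : Nat) : Int) := by omega
    rw [this, PySem.List.pyGetD_natCast]
    simp
  have hl : PySem.List.pyGetD (u ++ [y]) (m' : Int) 0 = PySem.List.pyGetD u (m' : Int) 0 :=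
    pyGetD_append_left' u y _ (by positivity) (by omega)
  simp only [List.foldl_cons, List.foldl_nil, hy, hl]

-- B's accumulator is additive
theorem countAltGo_add (t : List Int) (c : Int) (h : Nat) (cnt a : Int) :
    countAltGo t c h (cnt + a) = countAltGo t c h cnt + a := by
  induction h generalizing cnt with
  | zero => rfl
  | succ k ih =>
      simp only [countAltGo]
      split_ifs with hgap
      · rw [show cnt + a + 1 = (cnt + 1) + a by ring, ih]
      · rfl

-- B's loop does not look past index h, so appending y is invisible below the length
theorem countAltGo_append_left (u : List Int) (y c : Int) (h : Nat) (cnt : Int)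
    (hh : h < u.length) :
    countAltGo (u ++ [y]) c h cnt = countAltGo u c h cnt := by
  induction h generalizing cnt with
  | zero => rfl
  | succ k ih =>
      simp only [countAltGo]
      rw [pyGetD_append_left' u y (k : Int) (by positivity) (by exact_mod_cast Nat.lt_of_succ_lt hh),
          pyGetD_append_left' u y ((k : Int) + 1) (by positivity) (by exact_mod_cast hh)]
      split_ifs with hgap
      · exact ih _ (Nat.lt_of_succ_lt hh)
      · rfl

-- B, one element peeled from the back (same shape as count_append)
theorem count_alt_append (u : List Int) (y : Int) (c : Int) (hu : u ≠ []) :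
    count_alt (u ++ [y]) c =
      if y - PySem.List.pyGetD u ((u.length : Int) - 1) 0 ≤ c then count_alt u c + 1 else 1 := by
  obtain ⟨m', hm⟩ : ∃ m', u.length = m' + 1 :=
    ⟨u.length - 1, by have := List.length_pos_iff.mpr hu; omega⟩
  unfold count_alt
  have hlen : (u ++ [y]).length - 1 = m' + 1 := by simp [hm]
  have hb' : ((u.length : Int)) - 1 = (m' : Int) := by rw [hm]; push_cast; ring
  have hlen' : u.length - 1 = m' := by omega
  rw [hlen, hb', hlen']
  simp only [countAltGo]
  have hy : PySem.List.pyGetD (u ++ [y]) ((m' : Int) + 1) 0 = y := by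
    have : ((m' : Int) + 1) = ((u.length : Nat) : Int) := by omega
    rw [this, PySem.List.pyGetD_natCast]
    simp
  have hl : PySem.List.pyGetD (u ++ [y]) (m' : Int) 0 = PySem.List.pyGetD u (m' : Int) 0 :=
    pyGetD_append_left' u y _ (by positivity) (by omega)
  rw [hy, hl]
  split_ifs with hgap
  · rw [countAltGo_append_left u y c m' (1 + 1) (by omega), countAltGo_add]
  · rfl

theorem count_eq_count_alt (t : List Int) (c : Int) : count t c = count_alt t c := by
  induction t using List.reverseRecOn with
  | nil => rfl
  | append_singleton u y ih =>
      rcases eq_or_ne u [] with rfl | hu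
      · rfl
      · rw [count_append u y c hu, count_alt_append u y c hu, ih]

-- ===== VERDICT (by name: the statement is the Claim_ definition above) =====
theorem count_spec : Claim_equal_count := by
  intro t c _
  unfold Spec_count
  exact count_eq_count_alt t c
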